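-- pv_equiv track=rewrite | github.com/maogongfei-dot/rentalai-backend | rental_app/module3_risk_result.py | _build_overall_risk_level
-- ===== SOURCE A (Python) =====
-- RISK_SEVERITY_PRIORITY_MAP = {
--     "eviction_risk": {"severity": "high", "priority": "high"},
--     "landlord_entry_risk": {"severity": "high", "priority": "high"},
--     "deposit_risk": {"severity": "medium", "priority": "medium"},
--     "repair_risk": {"severity": "medium", "priority": "medium"},
--     "notice_risk": {"severity": "medium", "priority": "medium"},
--     "rent_increase_risk": {"severity": "medium", "priority": "medium"},
--     "fee_charge_risk": {"severity": "low", "priority": "low"},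
-- }
--
-- def _build_overall_risk_level(risk_flags):
--     """根据命中 flags 的 severity 生成 overall_risk_level：任一 high->high，否则任一 medium->medium，否则任一 low->low，否则 none。"""
--     if not risk_flags:
--         return "none"
--     severities = set()
--     for flag in risk_flags:
--         s = (RISK_SEVERITY_PRIORITY_MAP.get(flag) or {}).get("severity") or "medium"
--         severities.add(s)
--     if "high" in severities:
--         return "high"
--     if "medium" in severities:
--         return "medium"
--     if "low" in severities:
--         return "low"
--     return "none"
-- ===== SOURCE B (Python) =====
-- _HIGH_FLAGS = frozenset({"eviction_risk", "landlord_entry_risk"})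
-- _LOW_FLAGS = frozenset({"fee_charge_risk"})
--
--
-- def _build_overall_risk_level(risk_flags):
--     # Short-circuiting cascade of membership scans over the raw flags:
--     # high iff some flag is a high-severity key; otherwise medium iff some
--     # flag is not the (only) low-severity key (unknown flags default to
--     # medium); otherwise every flag is low-severity, so low if non-empty.
--     if any(f in _HIGH_FLAGS for f in risk_flags):
--         return "high"
--     if any(f not in _LOW_FLAGS for f in risk_flags):
--         return "medium"
--     if risk_flags:
--         return "low"
--     return "none"
-- ===== Notes on version B (the rewrite author's own statement) =====
-- stated objective: simpler
-- what changed: Drops the severity mapping and the accumulated severity set entirely: an early-return cascade of short-circuit membership scans of the raw flag list against the two-element high-key set and the one-element low-key set decides the label directly.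
import Mathlib
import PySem

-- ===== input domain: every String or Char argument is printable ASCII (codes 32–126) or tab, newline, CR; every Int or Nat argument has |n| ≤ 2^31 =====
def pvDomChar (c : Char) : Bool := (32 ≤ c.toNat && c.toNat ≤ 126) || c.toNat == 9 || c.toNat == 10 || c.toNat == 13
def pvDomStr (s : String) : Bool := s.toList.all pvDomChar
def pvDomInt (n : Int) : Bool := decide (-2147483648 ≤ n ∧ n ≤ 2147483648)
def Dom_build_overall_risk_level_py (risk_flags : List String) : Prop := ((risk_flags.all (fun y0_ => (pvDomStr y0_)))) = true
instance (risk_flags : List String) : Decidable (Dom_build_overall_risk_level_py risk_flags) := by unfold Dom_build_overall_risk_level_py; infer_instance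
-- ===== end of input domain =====

-- B drops A's severity mapping and accumulated severity set: an early-return
-- cascade of membership scans of the raw flags decides the label directly (objective: simpler).

-- ===== PORT A =====
def riskSeverityPriorityMap : PySem.Dict String (PySem.Dict String String) :=
  PySem.Dict.ofList
    [ ("eviction_risk", PySem.Dict.ofList [("severity", "high"), ("priority", "high")])
    , ("landlord_entry_risk", PySem.Dict.ofList [("severity", "high"), ("priority", "high")])
    , ("deposit_risk", PySem.Dict.ofList [("severity", "medium"), ("priority", "medium")])
    , ("repair_risk", PySem.Dict.ofList [("severity", "medium"), ("priority", "medium")])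
    , ("notice_risk", PySem.Dict.ofList [("severity", "medium"), ("priority", "medium")])
    , ("rent_increase_risk", PySem.Dict.ofList [("severity", "medium"), ("priority", "medium")])
    , ("fee_charge_risk", PySem.Dict.ofList [("severity", "low"), ("priority", "low")]) ]

-- s = (RISK_SEVERITY_PRIORITY_MAP.get(flag) or {}).get("severity") or "medium"
-- ('x or y' for the dict: None and {} are falsy; for the string: None and "" are falsy)
def sevOfFlag (flag : String) : String :=
  let d := (PySem.Dict.get? riskSeverityPriorityMap flag).getD PySem.Dict.empty
  let s := (PySem.Dict.get? d "severity").getD ""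
  if s = "" then "medium" else s

def build_overall_risk_level_py (risk_flags : List String) : String :=
  if risk_flags = [] then "none"
  else
    let severities : PySem.Set String :=
      risk_flags.foldl (fun s flag => PySem.Set.add s (sevOfFlag flag)) PySem.Set.empty
    if PySem.Set.contains severities "high" then "high"
    else if PySem.Set.contains severities "medium" then "medium"
    else if PySem.Set.contains severities "low" then "low"
    else "none"

-- ===== PORT B =====
def highFlags : PySem.Set String := PySem.Set.ofList ["eviction_risk", "landlord_entry_risk"]
def lowFlags : PySem.Set String := PySem.Set.ofList ["fee_charge_risk"]

def build_overall_risk_level_py_alt (risk_flags : List String) : String :=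
  if risk_flags.any (fun f => PySem.Set.contains highFlags f) then "high"
  else if risk_flags.any (fun f => !PySem.Set.contains lowFlags f) then "medium"
  else if risk_flags ≠ [] then "low"
  else "none"

-- ===== PRECONDITION & SPEC =====
def Spec_build_overall_risk_level_py (risk_flags : List String) (out : String) : Prop := out = build_overall_risk_level_py_alt risk_flags
instance (risk_flags : List String) (out : String) : Decidable (Spec_build_overall_risk_level_py risk_flags out) := by unfold Spec_build_overall_risk_level_py; infer_instance

-- ===== CLAIM (what is proved, stated in full; the proofs are below) =====
def Claim_equal_build_overall_risk_level_py : Prop := ∀ (risk_flags : List String), Dom_build_overall_risk_level_py risk_flags → Spec_build_overall_risk_level_py risk_flags (build_overall_risk_level_py risk_flags)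

-- ===== LEMMAS AND PROOFS =====

-- A's per-flag severity lookup, as a plain if-chain over the seven keys
theorem sevOfFlag_eq (f : String) :
    sevOfFlag f = if f = "eviction_risk" then "high" else if f = "landlord_entry_risk" then "high"
      else if f = "fee_charge_risk" then "low" else "medium" := by
  simp only [sevOfFlag]
  rw [show riskSeverityPriorityMap = PySem.Dict.mk
    [ ("eviction_risk", PySem.Dict.mk [("severity", "high"), ("priority", "high")])
    , ("landlord_entry_risk", PySem.Dict.mk [("severity", "high"), ("priority", "high")])
    , ("deposit_risk", PySem.Dict.mk [("severity", "medium"), ("priority", "medium")])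
    , ("repair_risk", PySem.Dict.mk [("severity", "medium"), ("priority", "medium")])
    , ("notice_risk", PySem.Dict.mk [("severity", "medium"), ("priority", "medium")])
    , ("rent_increase_risk", PySem.Dict.mk [("severity", "medium"), ("priority", "medium")])
    , ("fee_charge_risk", PySem.Dict.mk [("severity", "low"), ("priority", "low")]) ] from by decide]
  simp only [PySem.Dict.get?_mk_cons]
  repeat' split
  all_goals simp_all [PySem.Dict.get?, PySem.Dict.empty, List.find?]

theorem contains_high_iff (f : String) :
    PySem.Set.contains highFlags f = true ↔ (f = "eviction_risk" ∨ f = "landlord_entry_risk") := by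
  rw [show highFlags = ["eviction_risk", "landlord_entry_risk"] from by decide]
  simp [PySem.Set.contains_eq_listContains]

theorem contains_low_iff (f : String) :
    PySem.Set.contains lowFlags f = true ↔ f = "fee_charge_risk" := by
  rw [show lowFlags = ["fee_charge_risk"] from by decide]
  simp [PySem.Set.contains_eq_listContains]

theorem sev_high (f : String) :
    sevOfFlag f = "high" ↔ (f = "eviction_risk" ∨ f = "landlord_entry_risk") := by
  rw [sevOfFlag_eq]; split_ifs <;> simp_all

theorem sev_med (f : String) :
    sevOfFlag f = "medium" ↔
      (¬(f = "eviction_risk" ∨ f = "landlord_entry_risk") ∧ ¬ f = "fee_charge_risk") := by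
  rw [sevOfFlag_eq]; split_ifs <;> simp_all

theorem sev_low (f : String) :
    sevOfFlag f = "low" ↔
      (¬(f = "eviction_risk" ∨ f = "landlord_entry_risk") ∧ f = "fee_charge_risk") := by
  rw [sevOfFlag_eq]; split_ifs <;> simp_all

-- membership in A's accumulated severity set
theorem mem_sevFold (l : List String) (s : PySem.Set String) (x : String) :
    x ∈ l.foldl (fun s flag => PySem.Set.add s (sevOfFlag flag)) s ↔
      x ∈ s ∨ ∃ f ∈ l, sevOfFlag f = x := by
  induction l generalizing s with
  | nil => simp
  | cons g t ih =>
      simp only [List.foldl_cons, ih, PySem.Set.mem_add, List.mem_cons]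
      constructor
      · rintro ((h | h) | ⟨f, hf, hx⟩)
        · exact Or.inl h
        · exact Or.inr ⟨g, Or.inl rfl, h.symm⟩
        · exact Or.inr ⟨f, Or.inr hf, hx⟩
      · rintro (h | ⟨f, (rfl | hf), hx⟩)
        · exact Or.inl (Or.inl h)
        · exact Or.inl (Or.inr hx.symm)
        · exact Or.inr ⟨f, hf, hx⟩

-- ===== VERDICT (by name: the statement is the Claim_ definition above) =====
theorem build_overall_risk_level_py_spec : Claim_equal_build_overall_risk_level_py := by
  intro l _
  unfold Spec_build_overall_risk_level_py build_overall_risk_level_py build_overall_risk_level_py_alt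
  by_cases hl : l = []
  · subst hl; rfl
  · rw [if_neg hl]
    have hset : ∀ x, (PySem.Set.contains
        (l.foldl (fun s flag => PySem.Set.add s (sevOfFlag flag)) PySem.Set.empty) x = true)
        ↔ ∃ f ∈ l, sevOfFlag f = x := by
      intro x
      rw [PySem.Set.contains_eq_listContains, List.contains_iff_mem, mem_sevFold]
      simp [PySem.Set.empty]
    by_cases hP : ∃ f ∈ l, f = "eviction_risk" ∨ f = "landlord_entry_risk"
    · obtain ⟨f, hf, h⟩ := hP
      rw [if_pos ((hset _).mpr ⟨f, hf, (sev_high f).mpr h⟩),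
          if_pos (List.any_eq_true.mpr ⟨f, hf, (contains_high_iff f).mpr h⟩)]
    · have hAh : ¬ (PySem.Set.contains _ "high" = true) := fun hc => by
        obtain ⟨f, hf, h⟩ := (hset _).mp hc
        exact hP ⟨f, hf, (sev_high f).mp h⟩
      have hBh : ¬ (l.any (fun f => PySem.Set.contains highFlags f) = true) := fun hc => by
        obtain ⟨f, hf, h⟩ := List.any_eq_true.mp hc
        exact hP ⟨f, hf, (contains_high_iff f).mp h⟩
      rw [if_neg hAh, if_neg hBh]
      by_cases hQ : ∃ f ∈ l, ¬ f = "fee_charge_risk"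
      · obtain ⟨f, hf, h⟩ := hQ
        have hfm : sevOfFlag f = "medium" :=
          (sev_med f).mpr ⟨fun hc => hP ⟨f, hf, hc⟩, h⟩
        rw [if_pos ((hset _).mpr ⟨f, hf, hfm⟩),
            if_pos (List.any_eq_true.mpr ⟨f, hf, by
              cases hc : PySem.Set.contains lowFlags f
              · rfl
              · exact absurd ((contains_low_iff f).mp hc) h⟩)]
      · -- every flag is the low key
        have hall : ∀ f ∈ l, sevOfFlag f = "low" := by
          intro f hf
          have h1 : f = "fee_charge_risk" := by
            by_contra hc; exact hQ ⟨f, hf, hc⟩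
          exact (sev_low f).mpr ⟨fun hc => hP ⟨f, hf, hc⟩, h1⟩
        have hAm : ¬ (PySem.Set.contains _ "medium" = true) := fun hc => by
          obtain ⟨f, hf, h⟩ := (hset _).mp hc
          rw [hall f hf] at h; exact absurd h (by decide)
        have hBm : ¬ (l.any (fun f => !PySem.Set.contains lowFlags f) = true) := fun hc => by
          obtain ⟨f, hf, h⟩ := List.any_eq_true.mp hc
          have : f = "fee_charge_risk" := by
            by_contra hcf; exact hQ ⟨f, hf, hcf⟩
          rw [(contains_low_iff f).mpr this] at h; exact absurd h (by decide)
        obtain ⟨g, t, rfl⟩ := List.exists_cons_of_ne_nil hl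
        rw [if_neg hAm, if_neg hBm,
            if_pos ((hset _).mpr ⟨g, List.mem_cons_self, hall g List.mem_cons_self⟩),
            if_pos (by simp)]
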